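-- pv_equiv track=rewrite | github.com/Dai0526/Algorithm | Algorithm/OnlineAssessment/LintCode/DepthFirstSearch/SplitString.py | splitString2
-- ===== SOURCE A (Python) =====
-- def splitString2(s):
--
--     n = len(s)
--     if n == 0: return [[]]
--     if n == 1: return [[s[:]]]
--
--     n_2, n_1 = [[]], [[s[n-1:]]]
--
--     for i in range(2, n+1):
--         n_0 = []
--         for sub in n_2:
--             newSub = [s[n-i:n-i+2]] + sub
--             n_0.append(newSub)
--         for sub in n_1:
--             newSub = [s[n-i]] + sub
--             n_0.append(newSub)
--         n_2, n_1 = n_1, n_0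
--
--     return n_0
-- ===== SOURCE B (Python) =====
-- def splitString2(s):
--     if len(s) == 0:
--         return [[]]
--     if len(s) == 1:
--         return [[s]]
--     res = []
--     for rest in splitString2(s[2:]):
--         res.append([s[0:2]] + rest)
--     for rest in splitString2(s[1:]):
--         res.append([s[0:1]] + rest)
--     return res
-- ===== Notes on version B (the rewrite author's own statement) =====
-- stated objective: simpler
-- what changed: Replaced A's bottom-up dynamic-programming loop that shuffles three registers (n_2, n_1, n_0) of suffix results with a direct top-down recursion: empty and single-character base cases, otherwise prepend the two-character prefix to each split of the rest and then the one-character prefix to each split of the rest.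
import Mathlib
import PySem

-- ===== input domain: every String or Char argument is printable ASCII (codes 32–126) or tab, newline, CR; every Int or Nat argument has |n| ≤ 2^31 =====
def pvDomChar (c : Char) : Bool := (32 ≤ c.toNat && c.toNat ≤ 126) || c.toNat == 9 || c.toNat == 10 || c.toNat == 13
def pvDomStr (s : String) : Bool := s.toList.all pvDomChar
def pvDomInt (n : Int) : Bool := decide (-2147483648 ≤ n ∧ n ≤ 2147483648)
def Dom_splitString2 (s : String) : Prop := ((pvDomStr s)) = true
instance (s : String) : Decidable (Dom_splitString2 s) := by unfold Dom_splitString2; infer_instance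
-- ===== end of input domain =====

-- B replaces A's bottom-up three-register dynamic programming loop with a direct
-- top-down structural recursion on the string (objective: simpler).

-- ===== PORT A =====
-- body of A's inner 'for i in range(2, n+1)' loop, acting on the state (n_2, n_1, n_0)
def splitLoopStep (cs : List Char) (n : Int)
    (st : List (List String) × List (List String) × List (List String)) (i : Int) :
    List (List String) × List (List String) × List (List String) :=
  let n0 := st.1.foldl
    (fun acc sub => acc ++ [String.ofList (PySem.List.slice cs (some (n - i)) (some (n - i + 2))) :: sub]) []
  let n0 := st.2.1.foldl
    (fun acc sub => acc ++ [(match PySem.List.pyGet? cs (n - i) with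
                             | some c => String.ofList [c]
                             | none => "") :: sub]) n0   -- s[n-i]: index is always in range here (2 ≤ i ≤ n)
  (st.2.1, n0, n0)

def splitString2 (s : String) : List (List String) :=
  let n : Int := PySem.Str.len s
  if n = 0 then [[]]
  else if n = 1 then [[s]]
  else
    let cs := s.toList
    ((PySem.List.pyRange 2 (n + 1) 1).foldl (splitLoopStep cs n)
      ([[]], [[String.ofList (PySem.List.slice cs (some (n - 1)) none)]], [])).2.2

-- ===== PORT B =====
def altSplit : List Char → List (List String)
  | [] => [[]]
  | [c] => [[String.ofList [c]]]
  | c1 :: c2 :: rest =>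
    let res := (altSplit rest).foldl (fun acc r => acc ++ [String.ofList [c1, c2] :: r]) []
    (altSplit (c2 :: rest)).foldl (fun acc r => acc ++ [String.ofList [c1] :: r]) res

def splitString2_alt (s : String) : List (List String) := altSplit s.toList

-- ===== PRECONDITION & SPEC =====
def Spec_splitString2 (s : String) (out : List (List String)) : Prop := out = splitString2_alt s
instance (s : String) (out : List (List String)) : Decidable (Spec_splitString2 s out) := by unfold Spec_splitString2; infer_instance

-- ===== CLAIM (what is proved, stated in full; the proofs are below) =====
def Claim_equal_splitString2 : Prop := ∀ (s : String), Dom_splitString2 s → Spec_splitString2 s (splitString2 s)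

-- ===== LEMMAS AND PROOFS =====

theorem altSplit_cons2 (c1 c2 : Char) (rest : List Char) :
    altSplit (c1 :: c2 :: rest)
      = (altSplit rest).map (String.ofList [c1, c2] :: ·)
        ++ (altSplit (c2 :: rest)).map (String.ofList [c1] :: ·) := by
  show ((altSplit (c2 :: rest)).foldl (fun acc r => acc ++ [String.ofList [c1] :: r])
    ((altSplit rest).foldl (fun acc r => acc ++ [String.ofList [c1, c2] :: r]) [])) = _
  rw [PySem.List.foldl_append_singleton_eq_map, PySem.List.foldl_append_singleton_eq_map,
    List.nil_append]

-- one iteration of A's loop turns (altSplit of the (k-1)-suffix, altSplit of the k-suffix, _)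
-- into the corresponding triple for the (k+1)-suffix
theorem splitLoopStep_eq (cs : List Char) (k : Nat) (h1 : 1 ≤ k) (hk : k + 1 ≤ cs.length)
    (X : List (List String)) :
    splitLoopStep cs (cs.length : Int)
      (altSplit (cs.drop (cs.length - (k - 1))), altSplit (cs.drop (cs.length - k)), X)
      ((k : Int) + 1)
    = (altSplit (cs.drop (cs.length - k)),
       altSplit (cs.drop (cs.length - (k + 1))),
       altSplit (cs.drop (cs.length - (k + 1)))) := by
  set n := cs.length with hn
  have hp : n - (k + 1) < n := by omega
  have hp1 : n - k < n := by omega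
  have e1 : n - (k + 1) + 1 = n - k := by omega
  have e2 : n - k + 1 = n - (k - 1) := by omega
  have hd1 : cs.drop (n - (k + 1)) = cs[n - (k + 1)] :: cs.drop (n - k) := by
    rw [List.drop_eq_getElem_cons hp, e1]
  have hd2 : cs.drop (n - k) = cs[n - k] :: cs.drop (n - (k - 1)) := by
    rw [List.drop_eq_getElem_cons hp1, e2]
  have hcast : (n : Int) - ((k : Int) + 1) = ((n - (k + 1) : Nat) : Int) := by omega
  have hslice : PySem.List.slice cs (some ((n : Int) - ((k : Int) + 1)))
      (some ((n : Int) - ((k : Int) + 1) + 2)) = [cs[n - (k + 1)], cs[n - k]] := by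
    rw [hcast, PySem.List.slice_toNat cs (by omega) (by omega)]
    have h2 : (((n - (k + 1) : Nat) : Int) + 2).toNat - ((n - (k + 1) : Nat) : Int).toNat = 2 := by
      omega
    rw [h2]
    simp only [Int.toNat_natCast, hd1, hd2]
    rfl
  have hget : PySem.List.pyGet? cs ((n : Int) - ((k : Int) + 1)) = some cs[n - (k + 1)] := by
    rw [hcast, PySem.List.pyGet?_natCast]
    exact List.getElem?_eq_getElem hp
  have key : altSplit (cs.drop (n - (k + 1)))
      = (altSplit (cs.drop (n - (k - 1)))).map (String.ofList [cs[n - (k + 1)], cs[n - k]] :: ·)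
        ++ (altSplit (cs.drop (n - k))).map (String.ofList [cs[n - (k + 1)]] :: ·) := by
    rw [hd1, hd2, altSplit_cons2, ← hd2]
  simp only [splitLoopStep, PySem.List.foldl_append_singleton_eq_map, hslice, hget,
    List.nil_append, key]

-- invariant of A's foldl over range(2, k+1)
theorem split_inv (cs : List Char) (k : Nat) (h2 : 2 ≤ k) (hn : k ≤ cs.length) :
    (PySem.List.pyRange 2 ((k : Int) + 1) 1).foldl (splitLoopStep cs (cs.length : Int))
      ([[]], [[String.ofList (PySem.List.slice cs (some ((cs.length : Int) - 1)) none)]], [])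
    = (altSplit (cs.drop (cs.length - (k - 1))),
       altSplit (cs.drop (cs.length - k)),
       altSplit (cs.drop (cs.length - k))) := by
  have hinit2 : [[String.ofList (PySem.List.slice cs (some ((cs.length : Int) - 1)) none)]]
      = altSplit (cs.drop (cs.length - 1)) := by
    have hc : (cs.length : Int) - 1 = ((cs.length - 1 : Nat) : Int) := by omega
    have hd : cs.drop (cs.length - 1) = [cs[cs.length - 1]'(by omega)] := by
      rw [List.drop_eq_getElem_cons (by omega : cs.length - 1 < cs.length)]
      have e : cs.length - 1 + 1 = cs.length := by omega
      rw [e, List.drop_length]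
    rw [hc, PySem.List.slice_from cs (by omega), Int.toNat_natCast, hd]
    rfl
  have hinit1 : ([[]] : List (List String)) = altSplit (cs.drop (cs.length - 0)) := by
    rw [Nat.sub_zero, List.drop_length]; rfl
  induction k, h2 using Nat.le_induction with
  | base =>
    have hr : PySem.List.pyRange 2 (((2 : Nat) : Int) + 1) 1 = [((1 : Nat) : Int) + 1] := by
      decide
    rw [hr, List.foldl_cons, List.foldl_nil, hinit2, hinit1]
    exact splitLoopStep_eq cs 1 le_rfl hn _
  | succ k hk ih =>
    have hrange : PySem.List.pyRange 2 (((k + 1 : Nat) : Int) + 1) 1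
        = PySem.List.pyRange 2 ((k : Int) + 1) 1 ++ [(k : Int) + 1] := by
      have e : ((k + 1 : Nat) : Int) + 1 = ((k : Int) + 1) + 1 := by omega
      rw [e]
      exact PySem.List.pyRange_one_succ_right (by omega)
    rw [hrange, List.foldl_append, ih (by omega)]
    simp only [List.foldl_cons, List.foldl_nil]
    have h := splitLoopStep_eq cs k (by omega) hn (altSplit (cs.drop (cs.length - k)))
    rw [h, Nat.add_sub_cancel]

-- ===== VERDICT (by name: the statement is the Claim_ definition above) =====
theorem splitString2_spec : Claim_equal_splitString2 := by
  intro s _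
  unfold Spec_splitString2 splitString2 splitString2_alt
  simp only [PySem.Str.len_eq]
  split_ifs with h0 h1
  · -- n = 0
    have h : s.toList = [] := List.length_eq_zero_iff.mp (by exact_mod_cast h0)
    rw [h]; rfl
  · -- n = 1
    obtain ⟨c, hc⟩ := List.length_eq_one_iff.mp (by exact_mod_cast h1)
    have hs : s = String.ofList [c] := by rw [← hc]; simp
    rw [hc, hs]
    rfl
  · -- n ≥ 2
    have hn2 : 2 ≤ s.toList.length := by omega
    have h := split_inv s.toList s.toList.length hn2 le_rfl
    rw [h]
    simp
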